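-- pv_equiv track=rewrite | github.com/tsbloxsom/303-Python | Combined_Project1.6.py | Subtract
-- ===== SOURCE A (Python) =====
-- def Subtract(userInput, newStartAnimals, acrossRiverAnimals):
--     user=userInput
--     strawCounter = 0
--     chickenCounter = 0
--     wolfCounter = 0
--     checkedAcrossRiverAnimals=[]
--     checkedNewStartAnimals=[]
--     if user== 1:
--         strawCounter+=1
--     if user==2:
--         chickenCounter+=1
--     if user==3:
--         wolfCounter+=1
--     for x in range (0,len(acrossRiverAnimals)):
--         checkedAcrossRiverAnimals.append(acrossRiverAnimals[x])
--     for x in range(0, len(newStartAnimals)):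
--         checkedNewStartAnimals.append(newStartAnimals[x])
--     for x in range (0, len(acrossRiverAnimals)):
--         if acrossRiverAnimals[x]== 1 and strawCounter==1:
--             checkedNewStartAnimals.append(1)
--             checkedAcrossRiverAnimals.remove(1)
--         if acrossRiverAnimals[x]== 2 and chickenCounter==1:
--             checkedNewStartAnimals.append(2)
--             checkedAcrossRiverAnimals.remove(2)
--         if acrossRiverAnimals[x]== 3 and wolfCounter==1:
--             checkedNewStartAnimals.append(3)
--             checkedAcrossRiverAnimals.remove(3)
--     return checkedAcrossRiverAnimals, checkedNewStartAnimals
-- ===== SOURCE B (Python) =====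
-- def Subtract(userInput, newStartAnimals, acrossRiverAnimals):
--     target = None
--     if userInput == 1:
--         target = 1
--     if userInput == 2:
--         target = 2
--     if userInput == 3:
--         target = 3
--     newAcross = list(acrossRiverAnimals)
--     newStart = list(newStartAnimals)
--     if target is not None:
--         n = acrossRiverAnimals.count(target)
--         newAcross = [a for a in acrossRiverAnimals if a != target]
--         newStart = newStart + [target] * n
--     return newAcross, newStart
-- ===== Notes on version B (the rewrite author's own statement) =====
-- stated objective: simpler
-- what changed: Replaces the three counters and the index loop that appends and calls list.remove inside it (quadratic) with a single selected target, a count, and one filter comprehension plus list extension.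
import Mathlib
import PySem

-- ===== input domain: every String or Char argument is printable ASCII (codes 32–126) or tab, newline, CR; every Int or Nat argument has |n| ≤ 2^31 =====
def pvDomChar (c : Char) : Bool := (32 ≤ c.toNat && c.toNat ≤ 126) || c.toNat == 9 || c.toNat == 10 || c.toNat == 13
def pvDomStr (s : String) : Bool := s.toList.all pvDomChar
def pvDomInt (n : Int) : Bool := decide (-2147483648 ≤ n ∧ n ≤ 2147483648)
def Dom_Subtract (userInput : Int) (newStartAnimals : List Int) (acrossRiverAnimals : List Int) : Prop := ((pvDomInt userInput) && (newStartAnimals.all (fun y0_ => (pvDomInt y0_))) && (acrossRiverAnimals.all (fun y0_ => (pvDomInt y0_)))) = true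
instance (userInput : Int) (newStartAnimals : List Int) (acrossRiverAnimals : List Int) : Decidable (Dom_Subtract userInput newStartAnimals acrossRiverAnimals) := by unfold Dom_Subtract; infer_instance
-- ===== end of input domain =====

-- B replaces A's three counters and its quadratic append-and-remove index loop by one
-- selected target, a count, and a single filter plus list extension (objective: simpler).

-- ===== PORT A =====
-- one step of A's third for-loop; `.getD` only covers list.remove's ValueError branch,
-- which A never reaches (the element was just seen in the list)
def SubtractStep (straw chicken wolf : Int) (st : List Int × List Int) (v : Int) : List Int × List Int :=
  let st := if v == 1 && straw == 1 then
      ((PySem.List.remove? st.1 1).getD st.1, st.2 ++ [1]) else st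
  let st := if v == 2 && chicken == 1 then
      ((PySem.List.remove? st.1 2).getD st.1, st.2 ++ [2]) else st
  if v == 3 && wolf == 1 then
      ((PySem.List.remove? st.1 3).getD st.1, st.2 ++ [3]) else st

def Subtract (userInput : Int) (newStartAnimals : List Int) (acrossRiverAnimals : List Int) : List Int × List Int :=
  let user := userInput
  let strawCounter : Int := 0
  let chickenCounter : Int := 0
  let wolfCounter : Int := 0
  let strawCounter := if user == 1 then strawCounter + 1 else strawCounter
  let chickenCounter := if user == 2 then chickenCounter + 1 else chickenCounter
  let wolfCounter := if user == 3 then wolfCounter + 1 else wolfCounter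
  let checkedAcrossRiverAnimals : List Int :=
    (PySem.List.pyRange 0 (PySem.List.len acrossRiverAnimals) 1).foldl
      (fun acc x => acc ++ [PySem.List.pyGetD acrossRiverAnimals x 0]) []
  let checkedNewStartAnimals : List Int :=
    (PySem.List.pyRange 0 (PySem.List.len newStartAnimals) 1).foldl
      (fun acc x => acc ++ [PySem.List.pyGetD newStartAnimals x 0]) []
  let st :=
    (PySem.List.pyRange 0 (PySem.List.len acrossRiverAnimals) 1).foldl
      (fun st x => SubtractStep strawCounter chickenCounter wolfCounter st
        (PySem.List.pyGetD acrossRiverAnimals x 0))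
      (checkedAcrossRiverAnimals, checkedNewStartAnimals)
  st

-- ===== PORT B =====
def Subtract_alt (userInput : Int) (newStartAnimals : List Int) (acrossRiverAnimals : List Int) : List Int × List Int :=
  let target : Option Int := none
  let target := if userInput == 1 then some 1 else target
  let target := if userInput == 2 then some 2 else target
  let target := if userInput == 3 then some 3 else target
  let newAcross := acrossRiverAnimals
  let newStart := newStartAnimals
  match target with
  | none => (newAcross, newStart)
  | some t =>
    let n := PySem.List.count acrossRiverAnimals t
    (acrossRiverAnimals.filter (fun a => a != t),
     newStart ++ PySem.List.pyRepeat [t] (n : Int))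

-- ===== PRECONDITION & SPEC =====
def Spec_Subtract (userInput : Int) (newStartAnimals : List Int) (acrossRiverAnimals : List Int) (out : List Int × List Int) : Prop := out = Subtract_alt userInput newStartAnimals acrossRiverAnimals
instance (userInput : Int) (newStartAnimals : List Int) (acrossRiverAnimals : List Int) (out : List Int × List Int) : Decidable (Spec_Subtract userInput newStartAnimals acrossRiverAnimals out) := by unfold Spec_Subtract; infer_instance

-- ===== CLAIM (what is proved, stated in full; the proofs are below) =====
def Claim_equal_Subtract : Prop := ∀ (userInput : Int) (newStartAnimals : List Int) (acrossRiverAnimals : List Int), Dom_Subtract userInput newStartAnimals acrossRiverAnimals → Spec_Subtract userInput newStartAnimals acrossRiverAnimals (Subtract userInput newStartAnimals acrossRiverAnimals)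

-- ===== LEMMAS AND PROOFS =====

-- removing the first occurrence of t from done ++ t :: rest, with t absent from done
theorem remove_split (t : Int) (done rest : List Int) (h : t ∉ done) :
    PySem.List.remove? (done ++ t :: rest) t = some (done ++ rest) := by
  induction done with
  | nil => simp
  | cons d ds ih =>
    have hd : d ≠ t := fun he => h (by simp [he])
    simp only [List.cons_append, PySem.List.remove?_cons_of_ne _ hd,
      ih (fun hm => h (List.mem_cons_of_mem _ hm)), Option.map_some]

-- with only the t-branch active, A's loop over xs (with the already-processed part
-- `done`, free of t) filters t out of the across list and appends one t per occurrence
theorem loop_inv (t : Int) (xs : List Int) : ∀ (done cs : List Int), t ∉ done →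
    xs.foldl (fun st v => if v == t then
        ((PySem.List.remove? st.1 t).getD st.1, st.2 ++ [t]) else st) (done ++ xs, cs)
    = (done ++ xs.filter (fun a => a != t), cs ++ List.replicate (List.count t xs) t) := by
  induction xs with
  | nil => intro done cs _; simp
  | cons v rest ih =>
    intro done cs h
    by_cases hv : v = t
    · subst hv
      rw [List.foldl_cons, if_pos (by simp), remove_split v done rest h]
      rw [show (some (done ++ rest)).getD (done ++ v :: rest) = done ++ rest from rfl]
      rw [ih done (cs ++ [v]) h]
      simp [← List.replicate_succ]
    · rw [List.foldl_cons, if_neg (by simp [hv])]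
      rw [show done ++ v :: rest = (done ++ [v]) ++ rest by simp]
      rw [ih (done ++ [v]) cs (by
        intro hm
        rcases List.mem_append.1 hm with hm | hm
        · exact h hm
        · have ht : t = v := by simpa using hm
          exact hv ht.symm)]
      simp [hv, bne_iff_ne]

-- with all counters 0 (userInput ∉ {1,2,3}), A's loop is the identity
theorem loop_id (xs : List Int) (st : List Int × List Int) :
    xs.foldl (SubtractStep 0 0 0) st = st := by
  induction xs generalizing st with
  | nil => rfl
  | cons v rest ih => simpa [SubtractStep] using ih st

-- SubtractStep with exactly one counter set is the single-target step
theorem step_single (t : Int) (ht : t = 1 ∨ t = 2 ∨ t = 3) (st : List Int × List Int) (v : Int) :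
    SubtractStep (if t = 1 then 1 else 0) (if t = 2 then 1 else 0) (if t = 3 then 1 else 0) st v
    = if v == t then ((PySem.List.remove? st.1 t).getD st.1, st.2 ++ [t]) else st := by
  rcases ht with h | h | h <;> subst h <;>
    simp only [SubtractStep] <;> by_cases hv : v = 1 <;> by_cases hv2 : v = 2 <;>
    by_cases hv3 : v = 3 <;> simp_all

-- A's third loop with exactly one counter active, started on the copies
theorem main_case (t : Int) (ht : t = 1 ∨ t = 2 ∨ t = 3) (ns ar : List Int) :
    ar.foldl (SubtractStep (if t = 1 then 1 else 0) (if t = 2 then 1 else 0)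
        (if t = 3 then 1 else 0)) (ar, ns)
    = (ar.filter (fun a => a != t), ns ++ List.replicate (List.count t ar) t) := by
  have hf : SubtractStep (if t = 1 then 1 else 0) (if t = 2 then 1 else 0)
      (if t = 3 then 1 else 0)
      = fun st v => if v == t then ((PySem.List.remove? st.1 t).getD st.1, st.2 ++ [t]) else st :=
    funext fun st => funext fun v => step_single t ht st v
  rw [hf]
  simpa using loop_inv t ar [] ns (by simp)

theorem subtract_eq (u : Int) (ns ar : List Int) :
    Subtract u ns ar = Subtract_alt u ns ar := by
  simp only [Subtract, Subtract_alt,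
    PySem.List.foldl_pyRange_zero_pyGetD ar (0 : Int) (fun acc x => acc ++ [x]) [],
    PySem.List.foldl_pyRange_zero_pyGetD ns (0 : Int) (fun acc x => acc ++ [x]) [],
    PySem.List.foldl_append_singleton, List.nil_append]
  rw [PySem.List.foldl_pyRange_zero_pyGetD ar (0 : Int) _ (ar, ns)]
  by_cases h1 : u = 1
  · subst h1
    norm_num
    simpa [PySem.List.pyRepeat_singleton, PySem.List.count_eq]
      using main_case 1 (Or.inl rfl) ns ar
  · by_cases h2 : u = 2
    · subst h2
      norm_num
      simpa [PySem.List.pyRepeat_singleton, PySem.List.count_eq]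
        using main_case 2 (Or.inr (Or.inl rfl)) ns ar
    · by_cases h3 : u = 3
      · subst h3
        norm_num
        simpa [PySem.List.pyRepeat_singleton, PySem.List.count_eq]
          using main_case 3 (Or.inr (Or.inr rfl)) ns ar
      · have hc1 : (u == 1) = false := by simpa using h1
        have hc2 : (u == 2) = false := by simpa using h2
        have hc3 : (u == 3) = false := by simpa using h3
        simp only [hc1, hc2, hc3, Bool.false_eq_true, if_false]
        exact loop_id ar (ar, ns)

-- ===== VERDICT (by name: the statement is the Claim_ definition above) =====
theorem Subtract_spec : Claim_equal_Subtract := by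
  intro u ns ar _
  unfold Spec_Subtract
  exact subtract_eq u ns ar
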